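-- pv_equiv track=rewrite | github.com/lockejan/scytale | skytale.py | skytale_decode
-- ===== SOURCE A (Python) =====
-- import math
--
-- def skytale_decode(input, diameter):
--     input = str(input)
--     out = str()
--
--     if diameter > 1:
--         diameter = math.ceil(len(input)/diameter)
--
--     for y in range(0,diameter):
--         out += input[y::diameter]
--
--     return out
-- ===== SOURCE B (Python) =====
-- import math
-- from itertools import zip_longest
--
--
-- def skytale_decode(input, diameter):
--     input = str(input)
--     k = diameter if diameter <= 1 else math.ceil(len(input) / diameter)
--     if k <= 0:
--         return ''
--     rows = [input[i:i + k] for i in range(0, len(input), k)]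
--     return ''.join(''.join(col) for col in zip_longest(*rows, fillvalue=''))
-- ===== Notes on version B (the rewrite author's own statement) =====
-- stated objective: idiomatic
-- what changed: B computes the row width once, chunks the input into grid rows, and reads the grid column-by-column via itertools.zip_longest (a transpose), instead of A's loop that concatenates k strided slices input[y::k].
import Mathlib
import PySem

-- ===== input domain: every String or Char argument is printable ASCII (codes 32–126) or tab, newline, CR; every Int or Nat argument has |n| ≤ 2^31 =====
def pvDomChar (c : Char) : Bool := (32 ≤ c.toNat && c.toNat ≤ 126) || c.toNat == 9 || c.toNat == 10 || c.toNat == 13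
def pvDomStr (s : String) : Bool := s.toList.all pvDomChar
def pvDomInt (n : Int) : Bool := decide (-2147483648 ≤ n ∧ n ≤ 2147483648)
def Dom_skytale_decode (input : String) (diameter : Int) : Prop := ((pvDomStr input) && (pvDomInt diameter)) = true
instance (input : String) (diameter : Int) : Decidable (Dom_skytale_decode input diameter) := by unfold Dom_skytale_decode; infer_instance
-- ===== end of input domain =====

-- B re-reads the scytale grid by chunking the text into rows of the computed width and
-- transposing them (itertools.zip_longest) instead of concatenating k strided slices;
-- objective: idiomatic. Return values agree on all inputs.

-- ===== PORT A =====
-- math.ceil(len(input)/diameter) is ported as the exact integer ceiling (len + d - 1)//d;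
-- exact here: CPython's correctly-rounded float division has the same ceiling at these magnitudes.
def skytale_decode (input : String) (diameter : Int) : String :=
  let xs := input.toList
  let d := if diameter > 1 then PySem.Int.floordiv ((xs.length : Int) + diameter - 1) diameter
           else diameter
  let out := (PySem.List.pyRange 0 d 1).foldl
    (fun acc y => acc ++ (PySem.List.slice? xs (some y) none d).getD []) []
  String.ofList out

-- ===== PORT B =====
-- termination helper for pvZipJoin (cited in its decreasing_by)
theorem pvZipJoin_measure_lt (rows : List (List Char)) (h : rows.all List.isEmpty = false) :
    ((rows.map List.tail).map List.length).sum < (rows.map List.length).sum := by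
  induction rows with
  | nil => simp at h
  | cons r rs ih =>
    simp only [List.all_cons, Bool.and_eq_false_iff] at h
    rcases h with h | h
    · have hle : ((rs.map List.tail).map List.length).sum ≤ (rs.map List.length).sum := by
        simp only [List.map_map]
        apply List.sum_le_sum
        intro a _
        simp only [Function.comp_apply, List.length_tail]
        omega
      have : r.tail.length < r.length := by
        cases r with
        | nil => simp at h
        | cons a t => simp
      simp only [List.map_cons, List.sum_cons]
      omega
    · have := ih h
      have : r.tail.length ≤ r.length := by simp [List.length_tail]
      simp only [List.map_cons, List.sum_cons]
      omega

-- join of itertools.zip_longest(*rows, fillvalue='') : each pass emits the heads of the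
-- still-nonempty rows (the fillvalue '' contributes nothing to the join), then recurses on the tails.
def pvZipJoin (rows : List (List Char)) : List Char :=
  if h : rows.all List.isEmpty then []
  else rows.filterMap List.head? ++ pvZipJoin (rows.map List.tail)
termination_by (rows.map List.length).sum
decreasing_by simpa using pvZipJoin_measure_lt rows (by simpa using h)

-- same comment as in port A: math.ceil(len(input)/diameter) ported as (len + d - 1)//d (exact here)
def skytale_decode_alt (input : String) (diameter : Int) : String :=
  let xs := input.toList
  let k := if diameter ≤ 1 then diameter
           else PySem.Int.floordiv ((xs.length : Int) + diameter - 1) diameter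
  if k ≤ 0 then ""
  else
    let rows := (PySem.List.pyRange 0 (xs.length : Int) k).map
      (fun i => PySem.List.slice xs (some i) (some (i + k)))
    String.ofList (pvZipJoin rows)

-- ===== PRECONDITION & SPEC =====
def Spec_skytale_decode (input : String) (diameter : Int) (out : String) : Prop := out = skytale_decode_alt input diameter
instance (input : String) (diameter : Int) (out : String) : Decidable (Spec_skytale_decode input diameter out) := by unfold Spec_skytale_decode; infer_instance

-- ===== CLAIM (what is proved, stated in full; the proofs are below) =====
def Claim_equal_skytale_decode : Prop := ∀ (input : String) (diameter : Int), Dom_skytale_decode input diameter → Spec_skytale_decode input diameter (skytale_decode input diameter)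

-- ===== LEMMAS AND PROOFS =====

theorem pvCnt_succ (K n : Nat) (hK : 1 ≤ K) (hn : 1 ≤ n) :
    (n + K - 1) / K = (n - 1) / K + 1 := by
  have h1 : n + K - 1 = (n - 1) + K := by omega
  rw [h1, Nat.add_div_right _ (by omega)]

-- the grid: rows of width K (as B builds it)
def pvChunk (K : Nat) : List Char → List (List Char)
  | [] => []
  | x :: t => (x :: t).take K :: pvChunk K (t.drop (K - 1))
termination_by l => l.length
decreasing_by simp

-- canonical column y of the grid for stride K: characters at indices y, y+K, y+2K, …
def pvCol (xs : List Char) (y K : Nat) : List Char :=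
  (List.range xs.length).filterMap (fun j => xs[y + K * j]?)

-- a filterMap over range N may be truncated where the function is none from m on
theorem pvFilterMap_range_ext {α : Type} (g : Nat → Option α) (m N : Nat) (hmN : m ≤ N)
    (hnone : ∀ j, m ≤ j → g j = none) :
    (List.range N).filterMap g = (List.range m).filterMap g := by
  induction N with
  | zero => have : m = 0 := by omega
            subst this; rfl
  | succ N ih =>
    rcases Nat.eq_or_lt_of_le hmN with h | h
    · subst h; rfl
    · have hm : m ≤ N := by omega
      rw [List.range_succ, List.filterMap_append, ih hm]
      simp [hnone N hm]

theorem pvChunk_eq_map_range (K : Nat) (hK : 1 ≤ K) (xs : List Char) :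
    pvChunk K xs = (List.range ((xs.length + K - 1) / K)).map
      (fun j => (xs.drop (K * j)).take K) := by
  induction xs using pvChunk.induct K with
  | case1 => simp [pvChunk, Nat.div_eq_of_lt (by omega : K - 1 < K)]
  | case2 x t ih =>
    have hn : 1 ≤ (x :: t).length := by simp
    rw [pvChunk, ih]
    have hlen : (t.drop (K - 1)).length = (x :: t).length - K := by
      simp; omega
    have hcnt' : ((t.drop (K - 1)).length + K - 1) / K = ((x :: t).length - 1) / K := by
      rw [hlen]
      by_cases hc : K ≤ (x :: t).length
      · congr 1; omega
      · have h0 : (x :: t).length - K = 0 := by omega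
        rw [h0]
        rw [Nat.div_eq_of_lt (by omega), Nat.div_eq_of_lt (by omega)]
    rw [hcnt', pvCnt_succ K _ hK hn, List.range_succ_eq_map]
    simp only [List.map_cons, List.map_map]
    congr 1
    apply List.map_congr_left
    intro a _
    simp only [Function.comp_apply, List.drop_drop, Nat.succ_eq_add_one]
    rw [Nat.mul_succ, show K * a + K = (K - 1 + K * a) + 1 from by omega,
        List.drop_succ_cons]

theorem pvChunk_length_le (K : Nat) (xs : List Char) :
    ∀ r ∈ pvChunk K xs, r.length ≤ K := by
  induction xs using pvChunk.induct K with
  | case1 => simp [pvChunk]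
  | case2 x t ih =>
    intro r hr
    rw [pvChunk, List.mem_cons] at hr
    rcases hr with hr | hr
    · simp [hr]
    · exact ih r hr

theorem pvZipJoin_eq_flatMap (K : Nat) (rows : List (List Char))
    (h : ∀ r ∈ rows, r.length ≤ K) :
    pvZipJoin rows = (List.range K).flatMap (fun y => rows.filterMap (fun r => r[y]?)) := by
  induction K generalizing rows with
  | zero =>
    have hall : rows.all List.isEmpty := by
      simp only [List.all_eq_true]
      intro r hr
      have := h r hr
      simp [List.length_eq_zero_iff.mp (show r.length = 0 by omega)]
    rw [pvZipJoin]
    simp [hall]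
  | succ K ih =>
    by_cases hall : rows.all List.isEmpty
    · rw [pvZipJoin, dif_pos hall]
      simp only [List.all_eq_true, List.isEmpty_iff] at hall
      symm
      apply List.flatMap_eq_nil_iff.mpr
      intro y _
      apply List.filterMap_eq_nil_iff.mpr
      intro r hr
      rw [hall r hr]
      simp
    · rw [pvZipJoin, dif_neg (by simpa using hall)]
      have htl : ∀ r ∈ rows.map List.tail, r.length ≤ K := by
        intro r hr
        rcases List.mem_map.mp hr with ⟨s, hs, rfl⟩
        have := h s hs
        simp [List.length_tail]
        omega
      rw [ih (rows.map List.tail) htl, List.range_succ_eq_map]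
      simp only [List.flatMap_cons, List.flatMap_map]
      congr 1
      · simp [List.head?_eq_getElem?]
      · congr 1
        funext y
        rw [List.filterMap_map]
        congr 1
        funext r
        simp [List.getElem?_tail]

theorem pvChunk_col (K : Nat) (hK : 1 ≤ K) (xs : List Char) (y : Nat) (hy : y < K) :
    (pvChunk K xs).filterMap (fun r => r[y]?) = pvCol xs y K := by
  rw [pvChunk_eq_map_range K hK, List.filterMap_map, pvCol]
  have hg : ∀ j : Nat, ((fun r : List Char => r[y]?) ∘ fun j => (xs.drop (K * j)).take K) j
      = xs[y + K * j]? := by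
    intro j
    simp only [Function.comp_apply, List.getElem?_take_of_lt hy, List.getElem?_drop]
    congr 1
    omega
  rw [show ((fun r : List Char => r[y]?) ∘ fun j => (xs.drop (K * j)).take K)
      = fun j => xs[y + K * j]? from funext hg]
  -- extend the range from the chunk count to xs.length
  set n := xs.length with hn
  have hq : K * ((n + K - 1) / K) + (n + K - 1) % K = n + K - 1 := Nat.div_add_mod _ _
  have hr : (n + K - 1) % K < K := Nat.mod_lt _ (by omega)
  have hcle : (n + K - 1) / K ≤ n := by
    by_cases h0 : n = 0
    · rw [h0]; simp [Nat.div_eq_of_lt (by omega : K - 1 < K)]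
    · rw [pvCnt_succ K n hK (by omega)]
      have := Nat.div_le_self (n - 1) K
      omega
  symm
  apply pvFilterMap_range_ext _ _ _ hcle
  intro j hj
  apply List.getElem?_eq_none
  have : K * ((n + K - 1) / K) ≤ K * j := Nat.mul_le_mul_left K hj
  omega

theorem pvSlice?_eq_col (xs : List Char) (y k : Int) (h0 : 0 ≤ y) (hk : 1 ≤ k) :
    (PySem.List.slice? xs (some y) none k).getD [] = pvCol xs y.toNat k.toNat := by
  simp only [PySem.List.slice?, PySem.List.sliceIndices]
  rw [if_neg (by omega : ¬ k = 0)]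
  simp only [if_neg (show ¬ k < 0 by omega), if_neg (show ¬ y < 0 by omega),
    if_pos (show 0 < k by omega)]
  by_cases hyn : y < (xs.length : Int)
  · rw [min_eq_left (by omega), if_pos (by omega)]
    simp only [Option.getD_some]
    have hgeq : (fun j : Nat => xs[(y + k * (j : Int)).toNat]?)
        = fun j : Nat => xs[y.toNat + k.toNat * j]? := by
      funext j
      congr 1
      have : ((y.toNat + k.toNat * j : Nat) : Int) = y + k * (j : Int) := by
        push_cast [Int.toNat_of_nonneg h0, Int.toNat_of_nonneg (show (0:Int) ≤ k by omega)]
        ring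
      omega
    rw [hgeq]
    set n := xs.length with hn
    set q : Int := ((n : Int) - y + k - 1) / k with hq
    have hdm : k * q + ((n : Int) - y + k - 1) % k = (n : Int) - y + k - 1 :=
      Int.ediv_add_emod _ _
    have hm0 : 0 ≤ ((n : Int) - y + k - 1) % k := Int.emod_nonneg _ (by omega)
    have hmk : ((n : Int) - y + k - 1) % k < k := Int.emod_lt_of_pos _ (by omega)
    have hkq1 : (n : Int) - y ≤ k * q := by omega
    have hqle : q ≤ (n : Int) - y := by
      by_contra hcon
      push_neg at hcon
      have h1 : k * ((n : Int) - y + 1) ≤ k * q :=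
        Int.mul_le_mul_of_nonneg_left (by omega) (by omega)
      have h2 : (n : Int) - y ≤ k * ((n : Int) - y) :=
        le_mul_of_one_le_left (by omega) hk
      have h3 : k * ((n : Int) - y + 1) = k * ((n : Int) - y) + k := by ring
      omega
    have hq0 : 0 ≤ q := by
      by_contra hcon
      push_neg at hcon
      have h1 : k * q ≤ k * (-1) := Int.mul_le_mul_of_nonneg_left (by omega) (by omega)
      omega
    rw [pvCol]
    symm
    apply pvFilterMap_range_ext _ q.toNat n (by omega)
    intro j hj
    apply List.getElem?_eq_none
    have hjq : q ≤ (j : Int) := by omega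
    have h1 : k * q ≤ k * (j : Int) := Int.mul_le_mul_of_nonneg_left hjq (by omega)
    have hcast : ((y.toNat + k.toNat * j : Nat) : Int) = y + k * (j : Int) := by
      push_cast [Int.toNat_of_nonneg h0, Int.toNat_of_nonneg (show (0:Int) ≤ k by omega)]
      ring
    omega
  · rw [min_eq_right (by omega), if_neg (by omega)]
    simp only [Option.getD_some]
    symm
    apply List.filterMap_eq_nil_iff.mpr
    intro j _
    apply List.getElem?_eq_none
    omega

theorem pvRows_eq_chunk (xs : List Char) (k : Int) (hk : 1 ≤ k) :
    (PySem.List.pyRange 0 (xs.length : Int) k).map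
      (fun i => PySem.List.slice xs (some i) (some (i + k))) = pvChunk k.toNat xs := by
  obtain ⟨K, rfl⟩ : ∃ K : Nat, k = (K : Int) := ⟨k.toNat, by omega⟩
  have hK : 1 ≤ K := by omega
  rw [PySem.List.pyRange_of_pos _ _ (by omega), List.map_map, Int.toNat_natCast,
    pvChunk_eq_map_range K hK xs]
  have hcnt : (if (0:Int) < (xs.length : Int)
      then (((xs.length : Int) - 0 + (K : Int) - 1) / (K : Int)).toNat else 0)
      = (xs.length + K - 1) / K := by
    by_cases h0 : (0:Int) < (xs.length : Int)
    · rw [if_pos h0,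
        show ((xs.length : Int) - 0 + (K : Int) - 1) = ((xs.length + K - 1 : Nat) : Int) by
          omega,
        ← Int.natCast_ediv, Int.toNat_natCast]
    · rw [if_neg h0]
      have hx : xs.length = 0 := by omega
      rw [hx, Nat.div_eq_of_lt (by omega)]
  rw [hcnt]
  apply List.map_congr_left
  intro j _
  simp only [Function.comp_apply, zero_add]
  rw [PySem.List.slice_toNat xs (by positivity) (by positivity)]
  have hm : (K : Int) * (j : Int) = ((K * j : Nat) : Int) := by push_cast; ring
  congr 1
  omega

-- the heart: for any positive stride k the two readings of the grid coincide
theorem pvMain (xs : List Char) (k : Int) (hk : 1 ≤ k) :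
    (PySem.List.pyRange 0 k 1).foldl
      (fun acc y => acc ++ (PySem.List.slice? xs (some y) none k).getD []) []
    = pvZipJoin ((PySem.List.pyRange 0 (xs.length : Int) k).map
        (fun i => PySem.List.slice xs (some i) (some (i + k)))) := by
  rw [PySem.List.foldl_append_eq_flatMap, List.nil_append, PySem.List.pyRange_one,
    List.flatMap_map, pvRows_eq_chunk xs k hk,
    pvZipJoin_eq_flatMap k.toNat _ (pvChunk_length_le k.toNat xs)]
  simp only [Int.sub_zero]
  rw [List.flatMap_def, List.flatMap_def]
  congr 1
  apply List.map_congr_left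
  intro y hy
  have hyK : y < k.toNat := List.mem_range.mp hy
  rw [zero_add, pvSlice?_eq_col xs (y : Int) k (by omega) hk, Int.toNat_natCast,
    pvChunk_col k.toNat (by omega) xs y hyK]

-- ===== VERDICT (by name: the statement is the Claim_ definition above) =====
theorem skytale_decode_spec : Claim_equal_skytale_decode := by
  intro input diameter _
  unfold Spec_skytale_decode
  unfold skytale_decode skytale_decode_alt
  dsimp only
  set xs := input.toList with hxs
  by_cases hd : diameter > 1
  · rw [if_pos hd, if_neg (by omega : ¬ diameter ≤ 1)]
    set c := PySem.Int.floordiv ((xs.length : Int) + diameter - 1) diameter with hc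
    by_cases hc0 : c ≤ 0
    · rw [if_pos hc0, PySem.List.pyRange_one_eq_nil (by omega)]
      rfl
    · rw [if_neg hc0]
      exact congrArg String.ofList (pvMain xs c (by omega))
  · rw [if_neg hd, if_pos (by omega : diameter ≤ 1)]
    by_cases hd0 : diameter ≤ 0
    · rw [if_pos hd0, PySem.List.pyRange_one_eq_nil (by omega)]
      rfl
    · rw [if_neg hd0]
      exact congrArg String.ofList (pvMain xs diameter (by omega))
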